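-- pv_equiv track=rewrite | github.com/ShayAgros/POSIT | create_posit.py | create_seed_seq
-- ===== SOURCE A (Python) =====
-- def create_seed_seq(seed):
--     is_positive = int(seed > 0)
--     positive_seed = abs(seed)
--     seed_sequence = ""
--     for i in range(positive_seed):
--         seed_sequence = "{}".format(is_positive) + seed_sequence
--     seed_sequence = seed_sequence + "{}".format(int(not(is_positive)))
--
--     if (seed > 0):
--         seed_sequence = "1" + seed_sequence
--     return seed_sequence
-- ===== SOURCE B (Python) =====
-- def create_seed_seq(seed):
--     if seed > 0:
--         return "1" * (seed + 1) + "0"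
--     return "0" * (-seed) + "1"
-- ===== Notes on version B (the rewrite author's own statement) =====
-- stated objective: faster
-- what changed: Replaces the loop that prepends one character per iteration (quadratic repeated concatenation) with a closed-form string-multiplication expression.
import Mathlib
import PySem

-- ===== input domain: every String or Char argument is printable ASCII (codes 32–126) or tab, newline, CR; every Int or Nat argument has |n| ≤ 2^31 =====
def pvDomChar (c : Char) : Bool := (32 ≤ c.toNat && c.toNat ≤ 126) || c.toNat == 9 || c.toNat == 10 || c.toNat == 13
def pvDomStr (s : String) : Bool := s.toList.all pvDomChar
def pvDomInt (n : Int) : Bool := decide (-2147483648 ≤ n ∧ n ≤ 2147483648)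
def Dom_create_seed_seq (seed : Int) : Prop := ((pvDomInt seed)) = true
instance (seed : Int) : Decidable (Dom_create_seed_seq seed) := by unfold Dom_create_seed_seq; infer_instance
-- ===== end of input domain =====

-- B replaces A's per-iteration string concatenation loop by a closed-form
-- replicate ("string multiplication"): asymptotically faster (O(n) vs O(n^2)).

-- ===== PORT A =====
def create_seed_seq (seed : Int) : String :=
  let is_positive : Int := if seed > 0 then 1 else 0
  let positive_seed : Int := |seed|
  let seed_sequence : String :=
    (PySem.List.pyRange 0 positive_seed 1).foldl
      (fun s _ => PySem.Int.toStr is_positive ++ s) ""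
  let seed_sequence := seed_sequence ++ PySem.Int.toStr (if is_positive = 0 then 1 else 0)
  if seed > 0 then "1" ++ seed_sequence else seed_sequence

-- ===== PORT B =====
def create_seed_seq_alt (seed : Int) : String :=
  if seed > 0 then String.ofList (List.replicate (seed + 1).toNat '1') ++ "0"
  else String.ofList (List.replicate (-seed).toNat '0') ++ "1"

-- ===== PRECONDITION & SPEC =====
def Spec_create_seed_seq (seed : Int) (out : String) : Prop := out = create_seed_seq_alt seed
instance (seed : Int) (out : String) : Decidable (Spec_create_seed_seq seed out) := by unfold Spec_create_seed_seq; infer_instance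

-- ===== CLAIM (what is proved, stated in full; the proofs are below) =====
def Claim_equal_create_seed_seq : Prop := ∀ (seed : Int), Dom_create_seed_seq seed → Spec_create_seed_seq seed (create_seed_seq seed)

-- ===== LEMMAS AND PROOFS =====

-- A's loop prepends the one-character string `t` once per element of range(n): the
-- result is n copies of `t` in front of the initial accumulator.
theorem foldl_prepend_range (t : String) : ∀ (n : Nat) (s : String),
    (PySem.List.pyRange 0 (n : Int) 1).foldl (fun acc _ => t ++ acc) s
      = String.ofList (List.flatten (List.replicate n t.toList)) ++ s := by
  intro n
  induction n with
  | zero => intro s; simp [PySem.List.pyRange]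
  | succ k ih =>
    intro s
    have hsplit : PySem.List.pyRange 0 ((k : Nat) + 1 : Int) 1
        = PySem.List.pyRange 0 (k : Int) 1 ++ [(k : Int)] := by
      simpa using PySem.List.pyRange_one_succ_right (a := 0) (b := (k : Int)) (by omega)
    have : ((k + 1 : Nat) : Int) = ((k : Nat) + 1 : Int) := by push_cast; ring
    rw [this, hsplit, List.foldl_append]
    simp only [List.foldl_cons, List.foldl_nil]
    rw [ih s]
    apply String.toList_inj.mp
    simp [List.replicate_succ]

-- ===== VERDICT (by name: the statement is the Claim_ definition above) =====
theorem create_seed_seq_spec : Claim_equal_create_seed_seq := by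
  intro seed _
  unfold Spec_create_seed_seq create_seed_seq create_seed_seq_alt
  by_cases h : seed > 0
  · rw [show |seed| = ((seed.toNat : Nat) : Int) from by rw [abs_of_pos h]; omega]
    simp only [h, if_true]
    rw [show PySem.Int.toStr 1 = "1" from by decide]
    rw [show (if (1 : Int) = 0 then (1 : Int) else 0) = 0 from by decide]
    rw [show PySem.Int.toStr 0 = "0" from by decide]
    rw [foldl_prepend_range "1" seed.toNat ""]
    apply String.toList_inj.mp
    have hn : (seed + 1).toNat = seed.toNat + 1 := by omega
    have ht : ("1" : String).toList = ['1'] := by decide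
    have ht0 : ("0" : String).toList = ['0'] := by decide
    simp [hn, ht, ht0, List.replicate_succ]
  · rw [show |seed| = (((-seed).toNat : Nat) : Int) from by rw [abs_of_nonpos (by omega)]; omega]
    simp only [h, if_false]
    rw [show PySem.Int.toStr 0 = "0" from by decide]
    rw [show PySem.Int.toStr (if True then (1 : Int) else 0) = "1" from by decide]
    rw [foldl_prepend_range "0" (-seed).toNat ""]
    apply String.toList_inj.mp
    have ht : ("1" : String).toList = ['1'] := by decide
    have ht0 : ("0" : String).toList = ['0'] := by decide
    simp [ht, ht0]
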